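-- pv_equiv track=rewrite | github.com/haipham03/SLU-ASR | final_process.py | have_same_3_chars_in_order
-- ===== SOURCE A (Python) =====
-- def have_same_3_chars_in_order(str1, str2):
--     for i in range(len(str1)-2):
--         for j in range(i+1,len(str1)-1):
--             for k in range(j+1,len(str1)):
--                 for ii in range(len(str2)-2):
--                     for jj in range(ii+1,len(str2)-1):
--                         for kk in range(jj+1,len(str2)):
--                             if str1[i] == str2[ii] and str1[j] == str2[jj] and str1[k] == str2[kk]:
--                                 return True
--     return False
-- ===== SOURCE B (Python) =====
-- def have_same_3_chars_in_order(str1, str2):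
--     # Capped-LCS threshold DP (Hunt-Szymanski style): e_k is the least number
--     # of leading characters of str2 that contain a common subsequence of
--     # length k with the processed prefix of str1 (m + 1 when there is none).
--     # Each character of str1 refines the thresholds (longest first) with a
--     # single first-occurrence scan; answer as soon as e_3 is realised.
--     m = len(str2)
--     inf = m + 1
--     e1 = e2 = e3 = inf
--     for c in str1:
--         if e2 <= m:
--             p = str2.find(c, e2)
--             if p != -1 and p + 1 < e3:
--                 e3 = p + 1
--         if e1 <= m:
--             p = str2.find(c, e1)
--             if p != -1 and p + 1 < e2:
--                 e2 = p + 1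
--         p = str2.find(c)
--         if p != -1 and p + 1 < e1:
--             e1 = p + 1
--         if e3 <= m:
--             return True
--     return False
-- ===== Notes on version B (the rewrite author's own statement) =====
-- stated objective: faster
-- what changed: Replaced the sextuple nested index loop over all position triples of both strings by a threshold (Hunt-Szymanski style) LCS dynamic program capped at length 3: for k = 1,2,3 it maintains the least prefix of str2 sharing a common k-subsequence with the processed prefix of str1, refining each threshold with a single first-occurrence scan per character and returning True as soon as the k = 3 threshold is realised.
import Mathlib
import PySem

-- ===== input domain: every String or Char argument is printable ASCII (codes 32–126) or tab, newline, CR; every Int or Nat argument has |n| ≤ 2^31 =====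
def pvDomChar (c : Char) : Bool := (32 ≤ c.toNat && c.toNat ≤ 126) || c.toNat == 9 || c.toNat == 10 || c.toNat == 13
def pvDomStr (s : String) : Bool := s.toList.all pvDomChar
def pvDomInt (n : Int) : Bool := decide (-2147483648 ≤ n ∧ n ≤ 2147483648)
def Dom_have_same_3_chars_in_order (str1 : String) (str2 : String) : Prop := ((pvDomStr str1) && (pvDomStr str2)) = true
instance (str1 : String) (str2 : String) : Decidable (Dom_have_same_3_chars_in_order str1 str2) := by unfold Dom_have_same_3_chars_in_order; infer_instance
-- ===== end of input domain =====

-- B replaces A's sextuple nested index search by a threshold (Hunt-Szymanski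
-- style) dynamic program: for k = 1,2,3 it keeps the least prefix of str2
-- sharing a common k-subsequence with the processed prefix of str1, refined by
-- first-occurrence scans, answering as soon as the k = 3 threshold is realised
-- (objective: faster). Both return whether the two strings share a common
-- subsequence of length 3.


-- ===== PORT A =====
-- literal transliteration: each 'for … : if found return True' loop becomes an
-- `List.any` over the same `range`, the condition compares `str[idx]` via pyGet?.
def have_same_3_chars_in_order (str1 : String) (str2 : String) : Bool :=
  let n1 : Int := PySem.Str.len str1
  let n2 : Int := PySem.Str.len str2
  (PySem.List.pyRange 0 (n1 - 2) 1).any fun i =>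
    (PySem.List.pyRange (i + 1) (n1 - 1) 1).any fun j =>
      (PySem.List.pyRange (j + 1) n1 1).any fun k =>
        (PySem.List.pyRange 0 (n2 - 2) 1).any fun ii =>
          (PySem.List.pyRange (ii + 1) (n2 - 1) 1).any fun jj =>
            (PySem.List.pyRange (jj + 1) n2 1).any fun kk =>
              PySem.Str.pyGet? str1 i == PySem.Str.pyGet? str2 ii &&
              (PySem.Str.pyGet? str1 j == PySem.Str.pyGet? str2 jj &&
               PySem.Str.pyGet? str1 k == PySem.Str.pyGet? str2 kk)

-- ===== PORT B =====
-- Source B's loop body: refine the three thresholds (longest first, each from the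
-- PREVIOUS value of the one below) with first-occurrence scans of str2.
def pvStepB (str2 : String) (m : Int) (e : Int × Int × Int) (c : Char) : Int × Int × Int :=
  let e3' := if e.2.1 ≤ m then
      let p := PySem.Str.findFrom str2 (String.ofList [c]) e.2.1
      if p ≠ -1 ∧ p + 1 < e.2.2 then p + 1 else e.2.2
    else e.2.2
  let e2' := if e.1 ≤ m then
      let p := PySem.Str.findFrom str2 (String.ofList [c]) e.1
      if p ≠ -1 ∧ p + 1 < e.2.1 then p + 1 else e.2.1
    else e.2.1
  let p := PySem.Str.find str2 (String.ofList [c])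
  let e1' := if p ≠ -1 ∧ p + 1 < e.1 then p + 1 else e.1
  (e1', e2', e3')

-- 'for c in str1' with the early 'return True' once the top threshold is real
def pvLoopB (str2 : String) (m : Int) : List Char → Int × Int × Int → Bool
  | [], _ => false
  | c :: cs, e =>
      let e' := pvStepB str2 m e c
      if e'.2.2 ≤ m then true else pvLoopB str2 m cs e'

def have_same_3_chars_in_order_alt (str1 : String) (str2 : String) : Bool :=
  let m := PySem.Str.len str2
  pvLoopB str2 m str1.toList (m + 1, m + 1, m + 1)

-- ===== PRECONDITION & SPEC =====
def Spec_have_same_3_chars_in_order (str1 : String) (str2 : String) (out : Bool) : Prop := out = have_same_3_chars_in_order_alt str1 str2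
instance (str1 : String) (str2 : String) (out : Bool) : Decidable (Spec_have_same_3_chars_in_order str1 str2 out) := by unfold Spec_have_same_3_chars_in_order; infer_instance

-- ===== CLAIM (what is proved, stated in full; the proofs are below) =====
def Claim_equal_have_same_3_chars_in_order : Prop := ∀ (str1 : String) (str2 : String), Dom_have_same_3_chars_in_order str1 str2 → Spec_have_same_3_chars_in_order str1 str2 (have_same_3_chars_in_order str1 str2)

-- ===== LEMMAS AND PROOFS =====

def pvSub2 (b c : Char) (cs : List Char) : Prop :=
  ∃ j k : ℕ, j < k ∧ cs[j]? = some b ∧ cs[k]? = some c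

def pvSub3 (a b c : Char) (cs : List Char) : Prop :=
  ∃ i j k : ℕ, i < j ∧ j < k ∧ cs[i]? = some a ∧ cs[j]? = some b ∧ cs[k]? = some c

theorem pvSub2_iff (b c : Char) (cs : List Char) : pvSub2 b c cs ↔ [b, c].Sublist cs := by
  induction cs with
  | nil => simp [pvSub2]
  | cons x cs ih =>
      constructor
      · rintro ⟨j, k, hjk, hb, hc⟩
        cases j with
        | zero =>
            simp only [List.getElem?_cons_zero, Option.some_inj] at hb
            subst hb
            obtain ⟨k', rfl⟩ : ∃ k', k = k' + 1 := ⟨k - 1, by omega⟩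
            simp only [List.getElem?_cons_succ] at hc
            have : c ∈ cs := List.mem_iff_getElem?.mpr ⟨k', hc⟩
            exact List.cons_sublist_cons.mpr (List.singleton_sublist.mpr this)
        | succ j' =>
            obtain ⟨k', rfl⟩ : ∃ k', k = k' + 1 := ⟨k - 1, by omega⟩
            simp only [List.getElem?_cons_succ] at hb hc
            exact (ih.mp ⟨j', k', by omega, hb, hc⟩).cons x
      · intro h
        cases h with
        | cons _ h =>
            obtain ⟨j, k, hjk, hb, hc⟩ := ih.mpr h
            exact ⟨j + 1, k + 1, by omega, by simpa, by simpa⟩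
        | cons₂ _ h =>
            obtain ⟨k, hc⟩ := List.mem_iff_getElem?.mp (List.singleton_sublist.mp h)
            exact ⟨0, k + 1, by omega, by simp, by simpa⟩

theorem pvSub3_iff (a b c : Char) (cs : List Char) : pvSub3 a b c cs ↔ [a, b, c].Sublist cs := by
  induction cs with
  | nil => simp [pvSub3]
  | cons x cs ih =>
      constructor
      · rintro ⟨i, j, k, hij, hjk, ha, hb, hc⟩
        cases i with
        | zero =>
            simp only [List.getElem?_cons_zero, Option.some_inj] at ha
            subst ha
            obtain ⟨j', rfl⟩ : ∃ j', j = j' + 1 := ⟨j - 1, by omega⟩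
            obtain ⟨k', rfl⟩ : ∃ k', k = k' + 1 := ⟨k - 1, by omega⟩
            simp only [List.getElem?_cons_succ] at hb hc
            exact List.cons_sublist_cons.mpr ((pvSub2_iff b c cs).mp ⟨j', k', by omega, hb, hc⟩)
        | succ i' =>
            obtain ⟨j', rfl⟩ : ∃ j', j = j' + 1 := ⟨j - 1, by omega⟩
            obtain ⟨k', rfl⟩ : ∃ k', k = k' + 1 := ⟨k - 1, by omega⟩
            simp only [List.getElem?_cons_succ] at ha hb hc
            exact (ih.mp ⟨i', j', k', by omega, by omega, ha, hb, hc⟩).cons x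
      · intro h
        cases h with
        | cons _ h =>
            obtain ⟨i, j, k, hij, hjk, ha, hb, hc⟩ := ih.mpr h
            exact ⟨i + 1, j + 1, k + 1, by omega, by omega, by simpa, by simpa, by simpa⟩
        | cons₂ _ h =>
            obtain ⟨j, k, hjk, hb, hc⟩ := (pvSub2_iff b c cs).mpr h
            exact ⟨0, j + 1, k + 1, by omega, by omega, by simp, by simpa, by simpa⟩

-- characterisation of port A: true iff some ordered char triple occurs in both strings
theorem portA_iff (str1 str2 : String) :
    have_same_3_chars_in_order str1 str2 = true ↔
      ∃ a b c : Char, pvSub3 a b c str1.toList ∧ pvSub3 a b c str2.toList := by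
  unfold have_same_3_chars_in_order
  simp only [List.any_eq_true, PySem.List.mem_pyRange_one, Bool.and_eq_true, beq_iff_eq,
    PySem.Str.len_eq]
  constructor
  · rintro ⟨i, ⟨hi0, hi⟩, j, ⟨hij, hj⟩, k, ⟨hjk, hk⟩, ii, ⟨hii0, hii⟩, jj, ⟨hiijj, hjj⟩,
      kk, ⟨hjjkk, hkk⟩, e1, e2, e3⟩
    have hi0' : (0:Int) ≤ i := hi0
    have hj0 : (0:Int) ≤ j := by omega
    have hk0 : (0:Int) ≤ k := by omega
    have hii0' : (0:Int) ≤ ii := hii0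
    have hjj0 : (0:Int) ≤ jj := by omega
    have hkk0 : (0:Int) ≤ kk := by omega
    have hkL : k.toNat < str1.toList.length := by omega
    have hiL : i.toNat < str1.toList.length := by omega
    have hjL : j.toNat < str1.toList.length := by omega
    have e1' : str1.toList[i.toNat]? = str2.toList[ii.toNat]? := by
      rw [← Int.toNat_of_nonneg hi0', ← Int.toNat_of_nonneg hii0'] at e1
      simpa only [PySem.Str.pyGet?_natCast] using e1
    have e2' : str1.toList[j.toNat]? = str2.toList[jj.toNat]? := by
      rw [← Int.toNat_of_nonneg hj0, ← Int.toNat_of_nonneg hjj0] at e2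
      simpa only [PySem.Str.pyGet?_natCast] using e2
    have e3' : str1.toList[k.toNat]? = str2.toList[kk.toNat]? := by
      rw [← Int.toNat_of_nonneg hk0, ← Int.toNat_of_nonneg hkk0] at e3
      simpa only [PySem.Str.pyGet?_natCast] using e3
    refine ⟨str1.toList[i.toNat], str1.toList[j.toNat], str1.toList[k.toNat],
      ⟨i.toNat, j.toNat, k.toNat, by omega, by omega, by simp, by simp, by simp⟩,
      ⟨ii.toNat, jj.toNat, kk.toNat, by omega, by omega, ?_, ?_, ?_⟩⟩
    · rw [← e1']; simp
    · rw [← e2']; simp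
    · rw [← e3']; simp
  · rintro ⟨a, b, c, ⟨i, j, k, hij, hjk, ha1, hb1, hc1⟩, ⟨ii, jj, kk, hiijj, hjjkk, ha2, hb2, hc2⟩⟩
    have hk : k < str1.toList.length := (List.getElem?_eq_some_iff.mp hc1).1
    have hkk : kk < str2.toList.length := (List.getElem?_eq_some_iff.mp hc2).1
    refine ⟨(i : Int), ⟨by omega, by omega⟩, (j : Int), ⟨by omega, by omega⟩,
      (k : Int), ⟨by omega, by omega⟩, (ii : Int), ⟨by omega, by omega⟩,
      (jj : Int), ⟨by omega, by omega⟩, (kk : Int), ⟨by omega, by omega⟩, ?_, ?_, ?_⟩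
    · simp only [PySem.Str.pyGet?_natCast]; rw [ha1, ha2]
    · simp only [PySem.Str.pyGet?_natCast]; rw [hb1, hb2]
    · simp only [PySem.Str.pyGet?_natCast]; rw [hc1, hc2]

-- ---------- characterisation of Python's str.find for a single character ----------

theorem find_go_single (c : Char) : ∀ (l : List Char) (k : ℕ),
    PySem.Chars.find.go [c] l k =
      match List.findIdx? (fun x => x == c) l with
      | some i => ((k + i : ℕ) : ℤ)
      | none => -1
  | [], k => by rw [PySem.Chars.find.go.eq_def]; simp
  | d :: l, k => by
      rw [PySem.Chars.find.go.eq_def]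
      by_cases hcd : d = c
      · subst hcd
        simp [List.isPrefixOf, List.findIdx?_cons]
      · have h1 : [c].isPrefixOf (d :: l) = false := by
          simp only [List.isPrefixOf, Bool.and_eq_false_iff]
          left
          exact beq_false_of_ne (fun h => absurd h.symm hcd)
        have h2 : (d == c) = false := by simp [hcd]
        simp only [h1, Bool.false_eq_true, if_false, List.findIdx?_cons, h2,
          find_go_single c l (k + 1)]
        cases List.findIdx? (fun x => x == c) l with
        | none => simp
        | some i =>
            simp only [Option.map_some]
            push_cast
            ring

theorem chars_find_single (cs : List Char) (c : Char) :
    PySem.Chars.find cs [c] =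
      match List.findIdx? (fun x => x == c) cs with
      | some i => (i : ℤ)
      | none => -1 := by
  show PySem.Chars.find.go [c] cs 0 = _
  rw [find_go_single]
  cases List.findIdx? (fun x => x == c) cs <;> simp

theorem chars_findFrom_single (cs : List Char) (c : Char) (st : ℕ) (hst : st ≤ cs.length) :
    PySem.Chars.findFrom cs [c] (st : ℤ) =
      match List.findIdx? (fun x => x == c) (cs.drop st) with
      | some i => ((st + i : ℕ) : ℤ)
      | none => -1 := by
  show (if (cs.length : ℤ) < ((st : ℕ) : ℤ) then (-1 : ℤ)
        else
          if PySem.Chars.find (List.drop ((st : ℕ) : ℤ).toNat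
              (List.take (cs.length : ℤ).toNat cs)) [c] = -1 then -1
          else ((st : ℕ) : ℤ) + PySem.Chars.find (List.drop ((st : ℕ) : ℤ).toNat
              (List.take (cs.length : ℤ).toNat cs)) [c]) = _
  rw [if_neg (by omega)]
  simp only [Int.toNat_natCast, List.take_length, chars_find_single]
  cases h : List.findIdx? (fun x => x == c) (cs.drop st) with
  | none => simp
  | some i =>
      have hred : (match some i with
          | some i => ((i : ℕ) : ℤ)
          | none => (-1 : ℤ)) = ((i : ℕ) : ℤ) := rfl
      rw [hred, if_neg (by omega)]
      push_cast
      ring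

theorem chars_find_eq_from_zero (cs : List Char) (c : Char) :
    PySem.Chars.find cs [c] = PySem.Chars.findFrom cs [c] ((0 : ℕ) : ℤ) := by
  rw [chars_find_single, chars_findFrom_single cs c 0 (Nat.zero_le _)]
  simp

-- minimality/witness facts about findIdx?
theorem findIdx?_some_spec (p : Char → Bool) : ∀ (l : List Char) (i : ℕ),
    List.findIdx? p l = some i →
      (∃ x, l[i]? = some x ∧ p x = true) ∧
        ∀ j : ℕ, j < i → ∀ x, l[j]? = some x → p x = false
  | [], i => by simp
  | d :: l, i => by
      rw [List.findIdx?_cons]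
      by_cases hd : p d = true
      · rw [if_pos hd]
        intro h
        obtain rfl : i = 0 := by simpa using h.symm
        exact ⟨⟨d, rfl, hd⟩, fun j hj => by omega⟩
      · rw [if_neg hd]
        intro h
        obtain ⟨i', hi', rfl⟩ : ∃ i', List.findIdx? p l = some i' ∧ i = i' + 1 := by
          cases hfi : List.findIdx? p l with
          | none => rw [hfi] at h; simp at h
          | some v => rw [hfi] at h; simp at h; exact ⟨v, rfl, h.symm⟩
        obtain ⟨⟨x, hx, hpx⟩, hmin⟩ := findIdx?_some_spec p l i' hi'
        refine ⟨⟨x, by simpa using hx, hpx⟩, ?_⟩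
        intro j hj y hy
        cases j with
        | zero =>
            simp only [List.getElem?_cons_zero, Option.some_inj] at hy
            subst hy
            simpa using hd
        | succ j' =>
            simp only [List.getElem?_cons_succ] at hy
            exact hmin j' (by omega) y hy

-- ---------- the common-subsequence predicate the thresholds track ----------

-- pvC cs k u e : the first e characters of cs share a common subsequence of
-- length k with u
def pvC (cs : List Char) (k : ℕ) (u : List Char) (e : ℕ) : Prop :=
  ∃ l : List Char, l.length = k ∧ l.Sublist u ∧ l.Sublist (cs.take e)

theorem pvC_zero (cs u : List Char) (e : ℕ) : pvC cs 0 u e :=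
  ⟨[], rfl, List.nil_sublist u, List.nil_sublist _⟩

theorem pvC_mono_u {cs : List Char} {k : ℕ} {u u' : List Char} {e : ℕ}
    (h : u.Sublist u') : pvC cs k u e → pvC cs k u' e := by
  rintro ⟨l, hlen, hlu, hlw⟩
  exact ⟨l, hlen, hlu.trans h, hlw⟩

-- appending one character on the right of a sublist, positionally
theorem snoc_sublist_of (l : List Char) (c : Char) (w : List Char) (p : ℕ)
    (hp : w[p]? = some c) (hl : l.Sublist (w.take p)) : (l ++ [c]).Sublist w := by
  obtain ⟨hplen, hpc⟩ := List.getElem?_eq_some_iff.mp hp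
  have hw : w = w.take p ++ (c :: w.drop (p + 1)) := by
    conv_lhs => rw [← List.take_append_drop p w]
    rw [List.drop_eq_getElem_cons hplen, hpc]
  rw [hw]
  exact hl.append (List.cons_sublist_cons.mpr (List.nil_sublist _))

theorem snoc_sublist_iff (c : Char) : ∀ (l w : List Char),
    (l ++ [c]).Sublist w ↔ ∃ p : ℕ, w[p]? = some c ∧ l.Sublist (w.take p) := by
  intro l w
  induction w generalizing l with
  | nil =>
      constructor
      · intro h; rw [List.sublist_nil] at h; simp at h
      · rintro ⟨p, hp, -⟩; simp at hp
  | cons d w ih =>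
      constructor
      · intro h
        cases l with
        | nil =>
            simp only [List.nil_append, List.singleton_sublist] at h
            obtain ⟨p, hp⟩ := List.mem_iff_getElem?.mp h
            exact ⟨p, hp, List.nil_sublist _⟩
        | cons x l' =>
            cases h with
            | cons _ h' =>
                obtain ⟨p, hp, hl⟩ := (ih (x :: l')).mp h'
                exact ⟨p + 1, by simpa using hp,
                  by simpa [List.take_succ_cons] using hl.cons d⟩
            | cons₂ _ h' =>
                obtain ⟨p, hp, hl⟩ := (ih l').mp h'
                refine ⟨p + 1, by simpa using hp, ?_⟩
                simpa [List.take_succ_cons] using (List.cons_sublist_cons (a := d)).mpr hl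
      · rintro ⟨p, hp, hl⟩
        exact snoc_sublist_of _ c _ p hp hl

-- extending the str1 side by one character
theorem pvC_snoc (cs : List Char) (k : ℕ) (u : List Char) (c : Char) (e : ℕ) :
    pvC cs (k + 1) (u ++ [c]) e ↔
      pvC cs (k + 1) u e ∨ ∃ p : ℕ, p < e ∧ cs[p]? = some c ∧ pvC cs k u p := by
  constructor
  · rintro ⟨l, hlen, hlu, hlw⟩
    obtain ⟨l₁, l₂, rfl, h1, h2⟩ := List.sublist_append_iff.mp hlu
    rcases List.sublist_singleton.mp h2 with rfl | rfl
    · exact Or.inl ⟨l₁, by simpa using hlen, h1, by simpa using hlw⟩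
    · right
      obtain ⟨p, hp, hl₁⟩ := (snoc_sublist_iff c l₁ _).mp hlw
      rw [List.getElem?_take] at hp
      by_cases hpe : p < e
      · rw [if_pos hpe] at hp
        refine ⟨p, hpe, hp, l₁, by simpa using hlen, h1, ?_⟩
        rwa [List.take_take, min_eq_left (by omega)] at hl₁
      · rw [if_neg hpe] at hp; exact absurd hp (by simp)
  · rintro (⟨l, hlen, hlu, hlw⟩ | ⟨p, hpe, hpc, l', hl'len, hl'u, hl'w⟩)
    · exact ⟨l, hlen, hlu.trans (List.sublist_append_left u [c]), hlw⟩
    · refine ⟨l' ++ [c], by simp [hl'len], hl'u.append (List.Sublist.refl [c]), ?_⟩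
      refine snoc_sublist_of l' c _ p ?_ ?_
      · rw [List.getElem?_take, if_pos hpe]; exact hpc
      · rwa [List.take_take, min_eq_left (by omega)]

-- ---------- the threshold invariant ----------

-- t is exactly the least e with pvC cs k u e, and cs.length + 1 when none exists
def pvInv (cs : List Char) (k : ℕ) (u : List Char) (t : ℤ) : Prop :=
  0 ≤ t ∧ t ≤ (cs.length : ℤ) + 1 ∧
    ∀ e : ℕ, e ≤ cs.length → ((t ≤ (e : ℤ)) ↔ pvC cs k u e)

theorem pvInv_zero (cs u : List Char) : pvInv cs 0 u 0 :=
  ⟨le_refl 0, by omega, fun e _ => ⟨fun _ => pvC_zero cs u e, fun _ => by omega⟩⟩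

theorem not_pvC_nil (cs : List Char) (k : ℕ) (hk : k ≠ 0) (e : ℕ) :
    ¬ pvC cs k [] e := by
  rintro ⟨l, hlen, hlu, -⟩
  rw [List.sublist_nil] at hlu
  subst hlu
  simp at hlen
  omega

theorem pvInv_init (cs : List Char) (k : ℕ) (hk : k ≠ 0) :
    pvInv cs k [] ((cs.length : ℤ) + 1) :=
  ⟨by omega, le_refl _, fun e he =>
    ⟨fun h => by omega, fun h => absurd h (not_pvC_nil cs k hk e)⟩⟩

-- one guarded threshold update of Source B preserves the invariant one level up
theorem pvUpdate_inv (cs : List Char) (c : Char) (u : List Char) (k : ℕ) (tlow t : ℤ)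
    (hlow : pvInv cs k u tlow) (ht : pvInv cs (k + 1) u t) :
    pvInv cs (k + 1) (u ++ [c])
      (if tlow ≤ (cs.length : ℤ) then
        if PySem.Chars.findFrom cs [c] tlow ≠ -1 ∧ PySem.Chars.findFrom cs [c] tlow + 1 < t
        then PySem.Chars.findFrom cs [c] tlow + 1 else t
       else t) := by
  obtain ⟨hl0, hl1, hlowE⟩ := hlow
  obtain ⟨h0, h1, htE⟩ := ht
  by_cases hg : tlow ≤ (cs.length : ℤ)
  · rw [if_pos hg]
    have hstle : tlow.toNat ≤ cs.length := by omega
    have hcast : ((tlow.toNat : ℕ) : ℤ) = tlow := Int.toNat_of_nonneg hl0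
    have hff : PySem.Chars.findFrom cs [c] tlow =
        match List.findIdx? (fun x => x == c) (cs.drop tlow.toNat) with
        | some i => ((tlow.toNat + i : ℕ) : ℤ)
        | none => -1 := by
      rw [← hcast]; exact chars_findFrom_single cs c tlow.toNat hstle
    cases hfi : List.findIdx? (fun x => x == c) (cs.drop tlow.toNat) with
    | none =>
        rw [hfi] at hff
        have hff2 : PySem.Chars.findFrom cs [c] tlow = -1 := hff
        have hnone : ∀ p : ℕ, p < cs.length → tlow ≤ (p : ℤ) → cs[p]? ≠ some c := by
          intro p hpm hpl hpc
          have hmem : c ∈ cs.drop tlow.toNat := by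
            have hgp : (cs.drop tlow.toNat)[p - tlow.toNat]? = some c := by
              rw [List.getElem?_drop]
              rwa [show tlow.toNat + (p - tlow.toNat) = p by omega]
            exact List.mem_of_getElem? hgp
          have hfalse := (List.findIdx?_eq_none_iff.mp hfi) c hmem
          simp at hfalse
        rw [hff2]
        rw [if_neg (by simp)]
        refine ⟨h0, h1, fun e he => ?_⟩
        rw [pvC_snoc cs k u c e, ← htE e he]
        constructor
        · exact Or.inl
        · rintro (h | ⟨p, hpe, hpc, hCp⟩)
          · exact h
          · have hpl : tlow ≤ (p : ℤ) := (hlowE p (by omega)).mpr hCp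
            have hplen : p < cs.length := (List.getElem?_eq_some_iff.mp hpc).1
            exact absurd hpc (hnone p hplen hpl)
    | some i =>
        rw [hfi] at hff
        have hff2 : PySem.Chars.findFrom cs [c] tlow = ((tlow.toNat + i : ℕ) : ℤ) := hff
        obtain ⟨⟨x, hx, hpx⟩, hmin⟩ := findIdx?_some_spec _ _ _ hfi
        rw [List.getElem?_drop] at hx
        have hxc : x = c := by simpa using hpx
        have hq0c : cs[tlow.toNat + i]? = some c := by rw [← hxc]; exact hx
        have hq0m : tlow.toNat + i < cs.length := (List.getElem?_eq_some_iff.mp hq0c).1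
        have hkey : ∀ e : ℕ, e ≤ cs.length →
            ((∃ p : ℕ, p < e ∧ cs[p]? = some c ∧ pvC cs k u p) ↔ (tlow.toNat + i + 1 ≤ e)) := by
          intro e he
          constructor
          · rintro ⟨p, hpe, hpc, hCp⟩
            have hpl : tlow ≤ (p : ℤ) := (hlowE p (by omega)).mpr hCp
            by_cases hlt : p - tlow.toNat < i
            · exfalso
              have hgp : (cs.drop tlow.toNat)[p - tlow.toNat]? = some c := by
                rw [List.getElem?_drop]
                rwa [show tlow.toNat + (p - tlow.toNat) = p by omega]
              have hfalse := hmin (p - tlow.toNat) hlt c hgp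
              simp at hfalse
            · omega
          · intro hle
            exact ⟨tlow.toNat + i, by omega, hq0c,
              (hlowE (tlow.toNat + i) (by omega)).mp (by omega)⟩
        rw [hff2]
        have hne : ((tlow.toNat + i : ℕ) : ℤ) ≠ -1 := by push_cast; omega
        refine ⟨by split_ifs <;> push_cast <;> omega, by split_ifs <;> push_cast <;> omega,
          fun e he => ?_⟩
        rw [pvC_snoc cs k u c e, ← htE e he, hkey e he]
        split_ifs with hcond
        · constructor
          · intro h; right; push_cast at h; omega
          · rintro (h | h)
            · push_cast; omega
            · push_cast; omega
        · constructor
          · intro h; exact Or.inl h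
          · rintro (h | h)
            · exact h
            · push_cast at hcond; omega
  · rw [if_neg hg]
    refine ⟨h0, h1, fun e he => ?_⟩
    rw [pvC_snoc cs k u c e, ← htE e he]
    constructor
    · exact Or.inl
    · rintro (h | ⟨p, hpe, hpc, hCp⟩)
      · exact h
      · have := (hlowE p (by omega)).mpr hCp
        omega

-- Source B's step preserves all three invariants
theorem pvStepB_inv (str2 : String) (c : Char) (u : List Char) (e : Int × Int × Int)
    (h1 : pvInv str2.toList 1 u e.1) (h2 : pvInv str2.toList 2 u e.2.1)
    (h3 : pvInv str2.toList 3 u e.2.2) :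
    pvInv str2.toList 1 (u ++ [c]) (pvStepB str2 (PySem.Str.len str2) e c).1 ∧
    pvInv str2.toList 2 (u ++ [c]) (pvStepB str2 (PySem.Str.len str2) e c).2.1 ∧
    pvInv str2.toList 3 (u ++ [c]) (pvStepB str2 (PySem.Str.len str2) e c).2.2 := by
  have hbr : ∀ st : ℤ, PySem.Str.findFrom str2 (String.ofList [c]) st =
      PySem.Chars.findFrom str2.toList [c] st := by
    intro st; rw [PySem.Str.findFrom_eq]; simp
  have hbr0 : PySem.Str.find str2 (String.ofList [c]) =
      PySem.Chars.findFrom str2.toList [c] ((0 : ℕ) : ℤ) := by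
    rw [PySem.Str.find_eq, ← chars_find_eq_from_zero]; simp
  simp only [pvStepB, PySem.Str.len_eq, hbr, hbr0]
  refine ⟨?_, ?_, ?_⟩
  · have h := pvUpdate_inv str2.toList c u 0 ((0 : ℕ) : ℤ) e.1
      (by simpa using pvInv_zero str2.toList u) h1
    rw [if_pos (by positivity)] at h
    simpa using h
  · have h := pvUpdate_inv str2.toList c u 1 e.1 e.2.1 h1 h2
    simpa using h
  · have h := pvUpdate_inv str2.toList c u 2 e.2.1 e.2.2 h2 h3
    simpa using h

-- the loop with early exit decides pvC _ 3 _ for the whole of str1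
theorem pvLoopB_spec (str2 : String) : ∀ (rest u : List Char) (e : Int × Int × Int),
    pvInv str2.toList 1 u e.1 → pvInv str2.toList 2 u e.2.1 →
    pvInv str2.toList 3 u e.2.2 →
    ¬ pvC str2.toList 3 u str2.toList.length →
    (pvLoopB str2 (PySem.Str.len str2) rest e = true ↔
      pvC str2.toList 3 (u ++ rest) str2.toList.length) := by
  intro rest
  induction rest with
  | nil =>
      intro u e _ _ _ hnot
      simp only [pvLoopB, List.append_nil]
      exact ⟨fun h => by simp at h, fun h => absurd h hnot⟩
  | cons c rest ih =>
      intro u e h1 h2 h3 hnot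
      obtain ⟨i1, i2, i3⟩ := pvStepB_inv str2 c u e h1 h2 h3
      have hm3 : ((pvStepB str2 (PySem.Str.len str2) e c).2.2 ≤ (str2.toList.length : ℤ)) ↔
          pvC str2.toList 3 (u ++ [c]) str2.toList.length :=
        i3.2.2 str2.toList.length (le_refl _)
      rw [← PySem.Str.len_eq str2] at hm3
      show (if (pvStepB str2 (PySem.Str.len str2) e c).2.2 ≤ PySem.Str.len str2 then true
            else pvLoopB str2 (PySem.Str.len str2) rest
              (pvStepB str2 (PySem.Str.len str2) e c)) = true ↔ _
      by_cases hex : (pvStepB str2 (PySem.Str.len str2) e c).2.2 ≤ PySem.Str.len str2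
      · rw [if_pos hex]
        have hC : pvC str2.toList 3 (u ++ [c]) str2.toList.length := hm3.mp hex
        have hsub : (u ++ [c]).Sublist (u ++ c :: rest) :=
          (List.append_sublist_append_left u).mpr
            (List.cons_sublist_cons.mpr (List.nil_sublist rest))
        exact ⟨fun _ => pvC_mono_u hsub hC, fun _ => rfl⟩
      · rw [if_neg hex]
        have hih := ih (u ++ [c]) (pvStepB str2 (PySem.Str.len str2) e c) i1 i2 i3
          (fun h => hex (hm3.mpr h))
        rwa [← List.append_cons u c rest] at hih

theorem alt_iff (str1 str2 : String) :
    have_same_3_chars_in_order_alt str1 str2 = true ↔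
      ∃ l : List Char, l.length = 3 ∧ l.Sublist str1.toList ∧ l.Sublist str2.toList := by
  have hinit : ∀ k : ℕ, k ≠ 0 →
      pvInv str2.toList k [] (PySem.Str.len str2 + 1) := by
    intro k hk
    rw [PySem.Str.len_eq]
    exact pvInv_init str2.toList k hk
  have h := pvLoopB_spec str2 str1.toList []
    (PySem.Str.len str2 + 1, PySem.Str.len str2 + 1, PySem.Str.len str2 + 1)
    (hinit 1 (by omega)) (hinit 2 (by omega)) (hinit 3 (by omega))
    (not_pvC_nil str2.toList 3 (by omega) str2.toList.length)
  unfold have_same_3_chars_in_order_alt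
  rw [h, List.nil_append]
  unfold pvC
  rw [List.take_length]

-- ===== VERDICT (by name: the statement is the Claim_ definition above) =====
theorem have_same_3_chars_in_order_spec : Claim_equal_have_same_3_chars_in_order := by
  intro str1 str2 _
  unfold Spec_have_same_3_chars_in_order
  have hiff : have_same_3_chars_in_order str1 str2 = true ↔
      have_same_3_chars_in_order_alt str1 str2 = true := by
    rw [portA_iff, alt_iff]
    constructor
    · rintro ⟨a, b, c, h1, h2⟩
      exact ⟨[a, b, c], rfl, (pvSub3_iff a b c _).mp h1, (pvSub3_iff a b c _).mp h2⟩
    · rintro ⟨l, hlen, hs1, hs2⟩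
      obtain ⟨a, b, c, rfl⟩ := List.length_eq_three.mp hlen
      exact ⟨a, b, c, (pvSub3_iff a b c _).mpr hs1, (pvSub3_iff a b c _).mpr hs2⟩
  exact Bool.eq_iff_iff.mpr hiff
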